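-- pv_equiv track=rewrite | github.com/Shawn-Kim96/lidar_pointcloud_compression | src/models/compression.py | _encoder_stage_hws
-- ===== SOURCE A (Python) =====
-- def _encoder_stage_hws(height: int, width: int, num_stages: int):
--     h, w = int(height), int(width)
--     out = []
--     for _ in range(int(num_stages)):
--         h = (h + 1) // 2
--         w = (w + 1) // 2
--         out.append((h, w))
--     return out
-- ===== SOURCE B (Python) =====
-- def _encoder_stage_hws(height: int, width: int, num_stages: int):
--     h0, w0 = int(height), int(width)
--     return [(((h0 - 1) >> k) + 1, ((w0 - 1) >> k) + 1)
--             for k in range(1, int(num_stages) + 1)]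
-- ===== Notes on version B (the rewrite author's own statement) =====
-- stated objective: alternative
-- what changed: Replaces the stateful loop that threads the running halved dimensions with a per-stage closed form: stage k is computed independently from the original dimensions as ceil(dim/2^k) = ((dim - 1) >> k) + 1, so no intermediate state is carried between stages.
import Mathlib
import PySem

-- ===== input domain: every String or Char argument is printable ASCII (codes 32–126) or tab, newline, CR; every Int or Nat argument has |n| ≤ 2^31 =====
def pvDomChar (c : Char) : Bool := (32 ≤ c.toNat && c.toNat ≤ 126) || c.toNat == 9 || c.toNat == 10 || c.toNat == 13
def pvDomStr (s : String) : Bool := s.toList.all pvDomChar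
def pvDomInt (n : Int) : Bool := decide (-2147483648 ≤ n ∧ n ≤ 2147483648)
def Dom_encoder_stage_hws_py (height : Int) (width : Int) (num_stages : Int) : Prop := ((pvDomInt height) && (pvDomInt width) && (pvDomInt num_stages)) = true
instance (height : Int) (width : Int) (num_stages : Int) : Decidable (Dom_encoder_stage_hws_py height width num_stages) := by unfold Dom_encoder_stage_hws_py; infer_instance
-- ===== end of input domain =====

-- B replaces A's stateful halving loop with an independent closed form per stage
-- (stage k = ceil(dim/2^k) via ((dim - 1) >> k) + 1); alternative decomposition, same cost.


-- ===== PORT A =====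
def encoder_stage_hws_py (height : Int) (width : Int) (num_stages : Int) : List (Int × Int) :=
  -- h, w = int(height), int(width); out = []; for _ in range(int(num_stages)): …
  ((PySem.List.pyRange 0 num_stages 1).foldl
    (fun (s : Int × Int × List (Int × Int)) _ =>
      (PySem.Int.floordiv (s.1 + 1) 2, PySem.Int.floordiv (s.2.1 + 1) 2,
       s.2.2 ++ [(PySem.Int.floordiv (s.1 + 1) 2, PySem.Int.floordiv (s.2.1 + 1) 2)]))
    (height, width, [])).2.2

-- ===== PORT B =====
def encoder_stage_hws_py_alt (height : Int) (width : Int) (num_stages : Int) : List (Int × Int) :=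
  -- [(((h0 - 1) >> k) + 1, ((w0 - 1) >> k) + 1) for k in range(1, num_stages + 1)]
  -- Python's arithmetic right shift x >> k is exactly floor division by 2^k
  (PySem.List.pyRange 1 (num_stages + 1) 1).map (fun k =>
    (PySem.Int.floordiv (height - 1) (2 ^ k.toNat) + 1,
     PySem.Int.floordiv (width - 1) (2 ^ k.toNat) + 1))

-- ===== PRECONDITION & SPEC =====
def Spec_encoder_stage_hws_py (height : Int) (width : Int) (num_stages : Int) (out : List (Int × Int)) : Prop := out = encoder_stage_hws_py_alt height width num_stages
instance (height : Int) (width : Int) (num_stages : Int) (out : List (Int × Int)) : Decidable (Spec_encoder_stage_hws_py height width num_stages out) := by unfold Spec_encoder_stage_hws_py; infer_instance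

-- ===== CLAIM (what is proved, stated in full; the proofs are below) =====
def Claim_equal_encoder_stage_hws_py : Prop := ∀ (height : Int) (width : Int) (num_stages : Int), Dom_encoder_stage_hws_py height width num_stages → Spec_encoder_stage_hws_py height width num_stages (encoder_stage_hws_py height width num_stages)

-- ===== LEMMAS AND PROOFS =====

/-- k successive ceil-halvings of x, in closed form (Python's `(x + 2^k - 1) // 2^k`). -/
def cf (x : Int) (k : Nat) : Int := PySem.Int.floordiv (x + 2 ^ k - 1) (2 ^ k)

theorem cf_zero (x : Int) : cf x 0 = x := by
  simp [cf, PySem.Int.floordiv, Int.fdiv_one]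

theorem cf_succ (x : Int) (k : Nat) :
    PySem.Int.floordiv (cf x k + 1) 2 = cf x (k + 1) := by
  have hk : ((2 : Int) ^ k) ≠ 0 := by positivity
  simp only [cf, PySem.Int.floordiv]
  have h1 : (x + 2 ^ k - 1).fdiv (2 ^ k) + 1 = (x + 2 ^ (k + 1) - 1).fdiv (2 ^ k) := by
    have h2 : x + 2 ^ (k + 1) - 1 = x + 2 ^ k - 1 + 1 * 2 ^ k := by ring
    rw [h2, Int.add_mul_fdiv_right _ 1 hk]
  rw [h1, Int.fdiv_fdiv_eq_fdiv_mul _ (by positivity) (by norm_num), pow_succ]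

/-- `cf x k = (x - 1) // 2^k + 1`: the closed form B uses (shift form of ceil division). -/
theorem cf_eq_shift (x : Int) (k : Nat) :
    cf x k = PySem.Int.floordiv (x - 1) (2 ^ k) + 1 := by
  have hk : ((2 : Int) ^ k) ≠ 0 := by positivity
  have h2 : x + 2 ^ k - 1 = x - 1 + 1 * 2 ^ k := by ring
  simp only [cf, PySem.Int.floordiv, h2, Int.add_mul_fdiv_right _ 1 hk]

theorem foldA_eq (l : List Int) : ∀ (x y : Int) (j : Nat) (acc : List (Int × Int)),
    (l.foldl
      (fun (s : Int × Int × List (Int × Int)) _ =>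
        (PySem.Int.floordiv (s.1 + 1) 2, PySem.Int.floordiv (s.2.1 + 1) 2,
         s.2.2 ++ [(PySem.Int.floordiv (s.1 + 1) 2, PySem.Int.floordiv (s.2.1 + 1) 2)]))
      (cf x j, cf y j, acc)).2.2
    = acc ++ (List.range l.length).map (fun i => (cf x (j + 1 + i), cf y (j + 1 + i))) := by
  induction l with
  | nil => intro x y j acc; simp
  | cons a l ih =>
    intro x y j acc
    simp only [List.foldl_cons, cf_succ]
    rw [ih x y (j + 1) (acc ++ [(cf x (j + 1), cf y (j + 1))])]
    have h : ∀ i : Nat, j + 1 + 1 + i = j + 1 + (i + 1) := fun i => by omega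
    simp [List.range_succ_eq_map, List.map_map, Function.comp, h]

theorem encoder_stage_hws_py_spec : Claim_equal_encoder_stage_hws_py := by
  intro height width num_stages _
  unfold Spec_encoder_stage_hws_py encoder_stage_hws_py encoder_stage_hws_py_alt
  have hA := foldA_eq (PySem.List.pyRange 0 num_stages 1) height width 0 []
  rw [cf_zero, cf_zero] at hA
  rw [hA, PySem.List.pyRange_one 1 (num_stages + 1), List.map_map,
      PySem.List.length_pyRange_one]
  have hlen : (num_stages - 0).toNat = (num_stages + 1 - 1).toNat := by omega
  rw [hlen]
  apply List.map_congr_left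
  intro i _
  have ht : ((1 : Int) + (i : Nat)).toNat = i + 1 := by omega
  have hi : 0 + 1 + i = i + 1 := by omega
  simp [cf_eq_shift, Function.comp, ht, hi]
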